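-- pv_equiv track=rewrite | github.com/JohnBurke4/qaoa_testing_framework | 3SATSolver.py | getValidSolutionsCount
-- ===== SOURCE A (Python) =====
-- def getValidSolutionsCount(guess, clause):
--     validSolutions = []
--     indexes = []
--     for i in range(0, len(clause)):
--         v1 = guess[i]
--         v2 = clause[i]
--         if (v1 != "X" and v2 != "X"):
--             if (v1 != v2):
--                 return 1
--
--         if (v1 == "X" and v2 != "X"):
--             indexes.append((i, v2))
--
--
--
--     if (len(indexes) == 0):
--         return 0
--
--
--     return 2**len(indexes) - 1
-- ===== SOURCE B (Python) =====
-- def getValidSolutionsCount(guess, clause):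
--     # Divide and conquer over index intervals: walk(lo, hi) yields the number of
--     # free positions in [lo, hi) or None if the interval contains a conflict;
--     # the left half is evaluated first, so the leftmost conflict wins.
--     def walk(lo, hi):
--         if hi <= lo:
--             return 0
--         if hi - lo == 1:
--             gh, ch = guess[lo], clause[lo]
--             if gh != "X" and ch != "X" and gh != ch:
--                 return None
--             return 1 if gh == "X" and ch != "X" else 0
--         mid = (lo + hi) // 2
--         left = walk(lo, mid)
--         if left is None:
--             return None
--         right = walk(mid, hi)
--         if right is None:
--             return None
--         return left + right
--     k = walk(0, len(clause))
--     return 1 if k is None else 2 ** k - 1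
-- ===== Notes on version B (the rewrite author's own statement) =====
-- stated objective: alternative
-- what changed: A's left-to-right index loop with an early return and an appended index list is replaced by a divide-and-conquer walk over index intervals that combines half-results (None on conflict, left half first so the leftmost conflict wins, free-position counts added), finished by the closed form 2**k - 1 which absorbs A's len==0 special case.
import Mathlib
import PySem

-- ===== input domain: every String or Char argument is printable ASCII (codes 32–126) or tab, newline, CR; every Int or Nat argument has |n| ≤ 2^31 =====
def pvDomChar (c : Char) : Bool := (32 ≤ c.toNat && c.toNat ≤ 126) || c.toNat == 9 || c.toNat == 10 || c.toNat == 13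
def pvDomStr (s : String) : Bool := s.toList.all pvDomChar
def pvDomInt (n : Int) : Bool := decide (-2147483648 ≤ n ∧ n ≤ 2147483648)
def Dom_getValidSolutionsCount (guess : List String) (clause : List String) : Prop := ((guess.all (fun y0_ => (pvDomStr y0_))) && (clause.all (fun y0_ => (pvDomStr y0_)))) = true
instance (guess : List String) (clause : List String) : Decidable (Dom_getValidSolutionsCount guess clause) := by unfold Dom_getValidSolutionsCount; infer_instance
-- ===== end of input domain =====

-- B replaces A's index loop (early return 1, appended index list) by a recursive
-- head/tail walk that propagates None on conflict and counts free positions,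
-- finished by the closed form 2^k - 1 (objective: alternative).
-- On inputs excluded by Pre_ both Pythons raise IndexError; the ports use a "" default there.

-- ===== PORT A =====
-- A's loop over range(0, len(clause)) with early return 1 and the `indexes` accumulator.
def goA (guess clause : List String) : List Nat → List (Nat × String) → Int
  | [], idxs => if idxs.length = 0 then 0 else 2 ^ idxs.length - 1
  | i :: rest, idxs =>
    let v1 := (PySem.List.pyGet? guess (Int.ofNat i)).getD ""   -- guess[i]; in range under Pre_
    let v2 := (PySem.List.pyGet? clause (Int.ofNat i)).getD ""  -- clause[i]; always in range here
    if v1 ≠ "X" ∧ v2 ≠ "X" ∧ v1 ≠ v2 then 1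
    else if v1 = "X" ∧ v2 ≠ "X" then goA guess clause rest (idxs ++ [(i, v2)])
    else goA guess clause rest idxs

def getValidSolutionsCount (guess : List String) (clause : List String) : Int :=
  goA guess clause (List.range clause.length) []

-- ===== PORT B =====
-- walk(lo, hi): number of free positions in [lo, hi), or none if the interval
-- holds a conflict; left half combined first, so the leftmost conflict wins.
-- guess[lo] is guess.getD lo "" (raises in Python only outside Pre_; see header line).
def walkDC (guess clause : List String) (lo hi : Nat) : Option Nat :=
  if hi ≤ lo then some 0
  else if hi - lo = 1 then
    -- gh = guess[lo], ch = clause[lo] (inlined)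
    if guess.getD lo "" ≠ "X" ∧ clause.getD lo "" ≠ "X" ∧ guess.getD lo "" ≠ clause.getD lo "" then none
    else some (if guess.getD lo "" = "X" ∧ clause.getD lo "" ≠ "X" then 1 else 0)
  else
    -- mid = (lo + hi) // 2 (inlined)
    match walkDC guess clause lo ((lo + hi) / 2) with
    | none => none
    | some l =>
      match walkDC guess clause ((lo + hi) / 2) hi with
      | none => none
      | some r => some (l + r)
termination_by hi - lo
decreasing_by all_goals omega

def getValidSolutionsCount_alt (guess : List String) (clause : List String) : Int :=
  match walkDC guess clause 0 clause.length with
  | none => 1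
  | some k => 2 ^ k - 1

-- ===== PRECONDITION & SPEC =====
-- Pre_ excludes exactly the inputs where Python A raises IndexError (and B raises it too):
-- guess shorter than clause with no conflict inside the first len(guess) positions.
def Pre_getValidSolutionsCount (guess : List String) (clause : List String) : Prop :=
  clause.length ≤ guess.length ∨
    ∃ i ∈ List.range (min guess.length clause.length),
      guess.getD i "" ≠ "X" ∧ clause.getD i "" ≠ "X" ∧ guess.getD i "" ≠ clause.getD i ""
instance (guess : List String) (clause : List String) : Decidable (Pre_getValidSolutionsCount guess clause) := by unfold Pre_getValidSolutionsCount; infer_instance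

def pvWitness_getValidSolutionsCount : List String × List String := (["1", "X"], ["1", "0"])

def Spec_getValidSolutionsCount (guess : List String) (clause : List String) (out : Int) : Prop := out = getValidSolutionsCount_alt guess clause
instance (guess : List String) (clause : List String) (out : Int) : Decidable (Spec_getValidSolutionsCount guess clause out) := by unfold Spec_getValidSolutionsCount; infer_instance

-- ===== CLAIM (what is proved, stated in full; the proofs are below) =====
def Claim_equal_getValidSolutionsCount : Prop := ∀ (guess : List String) (clause : List String), Dom_getValidSolutionsCount guess clause → Pre_getValidSolutionsCount guess clause → Spec_getValidSolutionsCount guess clause (getValidSolutionsCount guess clause)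

-- ===== LEMMAS AND PROOFS =====

def conflictAt (guess clause : List String) (i : Nat) : Bool :=
  let g := guess.getD i ""
  let c := clause.getD i ""
  g != "X" && c != "X" && g != c

def freeAt (guess clause : List String) (i : Nat) : Bool :=
  guess.getD i "" == "X" && clause.getD i "" != "X"

-- A's loop equals "1 if any conflict remains, else 2^(|idxs| + frees remaining) - 1";
-- note 2^0 - 1 = 0 absorbs A's `len(indexes) == 0` special case.
theorem goA_eq (guess clause : List String) (l : List Nat) (idxs : List (Nat × String)) :
    goA guess clause l idxs =
      if l.any (conflictAt guess clause) then 1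
      else 2 ^ (idxs.length + (l.filter (freeAt guess clause)).length) - 1 := by
  induction l generalizing idxs with
  | nil =>
    simp only [goA, List.any_nil, List.filter_nil, List.length_nil, Nat.add_zero, if_false,
      Bool.false_eq_true]
    rcases Nat.eq_zero_or_pos idxs.length with h | h
    · simp [h]
    · rw [if_neg (by omega)]
  | cons i rest ih =>
    by_cases hg : guess[i]?.getD "" = "X" <;>
      by_cases hcl : clause[i]?.getD "" = "X" <;>
        by_cases he : guess[i]?.getD "" = clause[i]?.getD "" <;>
          simp [goA, conflictAt, freeAt, hg, hcl, he, ih, bne_iff_ne, List.getD] <;>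
          split <;>
          first
          | rfl
          | (congr 2
             omega)

-- walkDC over [lo, hi) equals "none if any conflict in the interval, else the
-- number of free positions there".
-- walkDC over [lo, hi) equals "none if any conflict in the interval, else the
-- number of free positions there".
theorem walkDC_eq (guess clause : List String) (n : Nat) : ∀ (lo hi : Nat), hi - lo = n →
    walkDC guess clause lo hi =
      if (List.range' lo (hi - lo)).any (conflictAt guess clause) then none
      else some ((List.range' lo (hi - lo)).filter (freeAt guess clause)).length := by
  induction n using Nat.strong_induction_on with
  | _ n ih =>
    intro lo hi hn
    rw [walkDC]
    by_cases h0 : hi ≤ lo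
    · have hz : hi - lo = 0 := by omega
      simp [h0, hz]
    · rw [if_neg h0]
      by_cases h1 : hi - lo = 1
      · have hr : List.range' lo (hi - lo) = [lo] := by rw [h1]; rfl
        rw [if_pos h1, hr]
        simp only [List.any_cons, List.any_nil, Bool.or_false, List.filter_cons,
          List.filter_nil]
        by_cases hc : guess[lo]?.getD "" ≠ "X" ∧ clause[lo]?.getD "" ≠ "X" ∧
            guess[lo]?.getD "" ≠ clause[lo]?.getD ""
        · have hcb : conflictAt guess clause lo = true := by
            simp only [conflictAt, List.getD, Bool.and_eq_true, bne_iff_ne]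
            exact ⟨⟨hc.1, hc.2.1⟩, hc.2.2⟩
          simp [List.getD, hc, hcb]
        · have hcb : conflictAt guess clause lo = false := by
            simp only [conflictAt, List.getD, Bool.eq_false_iff]
            intro h
            simp only [Bool.and_eq_true, bne_iff_ne] at h
            exact hc ⟨h.1.1, h.1.2, h.2⟩
          by_cases hf : guess[lo]?.getD "" = "X" ∧ clause[lo]?.getD "" ≠ "X"
          · have hfb : freeAt guess clause lo = true := by
              simp [freeAt, List.getD, hf.1, bne_iff_ne, hf.2]
            simp [List.getD, hcb, hfb, hf.1, hf.2]
          · have hfb : freeAt guess clause lo = false := by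
              simp only [freeAt, List.getD, Bool.eq_false_iff]
              intro h
              simp only [Bool.and_eq_true, beq_iff_eq, bne_iff_ne] at h
              exact hf ⟨h.1, h.2⟩
            simp only [List.getD, hcb, hfb, Bool.false_eq_true, if_false, List.length_nil]
            rw [if_neg hf, if_neg hc]
      · have hmid1 : (lo + hi) / 2 - lo < n := by omega
        have hmid2 : hi - (lo + hi) / 2 < n := by omega
        have hsplit : List.range' lo (hi - lo) =
            List.range' lo ((lo + hi) / 2 - lo) ++
              List.range' ((lo + hi) / 2) (hi - (lo + hi) / 2) := by
          rw [show hi - lo = ((lo + hi) / 2 - lo) + (hi - (lo + hi) / 2) by omega,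
            ← List.range'_append,
            show lo + 1 * ((lo + hi) / 2 - lo) = (lo + hi) / 2 by omega]
        rw [ih _ hmid1 lo ((lo + hi) / 2) rfl, ih _ hmid2 ((lo + hi) / 2) hi rfl, hsplit]
        simp only [List.any_append, List.filter_append, List.length_append]
        by_cases hl : (List.range' lo ((lo + hi) / 2 - lo)).any (conflictAt guess clause) = true <;>
          by_cases hr : (List.range' ((lo + hi) / 2) (hi - (lo + hi) / 2)).any
              (conflictAt guess clause) = true <;>
            simp [hl, hr, h1]

-- ===== VERDICT (by name: the statement is the Claim_ definition above) =====
theorem getValidSolutionsCount_spec : Claim_equal_getValidSolutionsCount := by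
  intro guess clause _ _
  show getValidSolutionsCount guess clause = getValidSolutionsCount_alt guess clause
  rw [getValidSolutionsCount, goA_eq, getValidSolutionsCount_alt,
    walkDC_eq guess clause clause.length 0 clause.length rfl]
  rw [Nat.sub_zero, ← List.range_eq_range']
  by_cases h : (List.range clause.length).any (conflictAt guess clause) = true <;> simp [h]
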